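-- pv_equiv track=rewrite | github.com/HeckfyVEZA/canal | info_search.py | l_g
-- ===== SOURCE A (Python) =====
-- def l_g(spis):
--     spis = list(sorted(spis, key=lambda x: x[1]))
--     ispis = [spis[0]]
--     for i in range(1, len(spis)):
--         if spis[i][1] != spis[i-1][1]:
--             ispis.append(spis[i])
--         else:
--             ispis[-1][2]+=spis[i][2]
--     return ispis
-- ===== SOURCE B (Python) =====
-- def l_g(spis):
--     groups = {}
--     for row in spis:
--         k = row[1]
--         if k in groups:
--             groups[k][2] += row[2]
--         else:
--             groups[k] = row
--     return sorted(groups.values(), key=lambda x: x[1])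
-- ===== Notes on version B (the rewrite author's own statement) =====
-- stated objective: idiomatic
-- what changed: Replaces sort-first-then-merge-adjacent-duplicates with a single dict-grouping pass over the unsorted input (first-seen row kept and mutated in place) followed by one sort of the merged rows by key.
import Mathlib
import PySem

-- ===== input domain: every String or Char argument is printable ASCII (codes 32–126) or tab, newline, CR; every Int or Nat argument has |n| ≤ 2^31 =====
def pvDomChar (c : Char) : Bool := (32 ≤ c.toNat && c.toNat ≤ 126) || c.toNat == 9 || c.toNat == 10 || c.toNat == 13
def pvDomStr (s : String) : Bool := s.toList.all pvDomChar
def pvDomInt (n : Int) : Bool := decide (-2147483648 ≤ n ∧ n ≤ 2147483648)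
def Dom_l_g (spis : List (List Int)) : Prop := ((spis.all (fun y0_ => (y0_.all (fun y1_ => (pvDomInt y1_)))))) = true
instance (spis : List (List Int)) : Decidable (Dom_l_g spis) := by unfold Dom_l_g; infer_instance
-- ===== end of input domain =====

-- B groups rows by key in one dict pass over the unsorted input and sorts the merged
-- rows once, instead of A's sort-first-then-merge-adjacent scan (equivalence is about
-- the RETURN value; both Pythons mutate the first-seen row objects in place).

-- ===== PORT A =====
def l_g (spis : List (List Int)) : List (List Int) :=
  -- spis = list(sorted(spis, key=lambda x: x[1]))
  let s := PySem.List.sorted spis (fun x => PySem.List.pyGetD x 1 0)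
  -- ispis = [spis[0]]   (spis[0] exists under Pre_)
  let ispis : List (List Int) := [PySem.List.pyGetD s 0 []]
  -- for i in range(1, len(spis)): …
  (PySem.List.pyRange 1 (PySem.List.len s)).foldl
    (fun isp i =>
      if PySem.List.pyGetD (PySem.List.pyGetD s i []) 1 0 ≠
         PySem.List.pyGetD (PySem.List.pyGetD s (i-1) []) 1 0 then
        isp ++ [PySem.List.pyGetD s i []]                 -- ispis.append(spis[i])
      else
        -- ispis[-1][2] += spis[i][2]   (update of the last row at index 2)
        isp.dropLast ++ [(isp.getLastD []).set 2
          (PySem.List.pyGetD (isp.getLastD []) 2 0 +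
           PySem.List.pyGetD (PySem.List.pyGetD s i []) 2 0)])
    ispis

-- ===== PORT B =====
def l_g_alt (spis : List (List Int)) : List (List Int) :=
  -- groups = {}; for row in spis: …
  let d := spis.foldl
    (fun d row =>
      let k := PySem.List.pyGetD row 1 0                  -- k = row[1]
      if d.contains k then                                -- if k in groups:
        let g := d.getD k []
        d.insert k (g.set 2 (PySem.List.pyGetD g 2 0 +
                             PySem.List.pyGetD row 2 0))  --   groups[k][2] += row[2]
      else
        d.insert k row)                                   -- else: groups[k] = row
    (PySem.Dict.empty : PySem.Dict Int (List Int))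
  -- return sorted(groups.values(), key=lambda x: x[1])
  PySem.List.sorted d.values (fun x => PySem.List.pyGetD x 1 0)

-- ===== PRECONDITION & SPEC =====
-- Pre_ = exactly the inputs where Python A returns: nonempty, every row has a second
-- element (sort key), and every row whose key is duplicated has a third element
-- (otherwise the merge 'ispis[-1][2] += spis[i][2]' raises IndexError).
def Pre_l_g (spis : List (List Int)) : Prop :=
  spis ≠ [] ∧ ∀ r ∈ spis, 2 ≤ r.length ∧
    (1 < spis.countP (fun q => PySem.List.pyGetD q 1 0 == PySem.List.pyGetD r 1 0) →
      3 ≤ r.length)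
instance (spis : List (List Int)) : Decidable (Pre_l_g spis) := by unfold Pre_l_g; infer_instance
def pvWitness_l_g : List (List Int) := [[0, 5, 1], [7, 3, 2], [1, 5, 10], [2, 3, 4]]

def Spec_l_g (spis : List (List Int)) (out : List (List Int)) : Prop := out = l_g_alt spis
instance (spis : List (List Int)) (out : List (List Int)) : Decidable (Spec_l_g spis out) := by unfold Spec_l_g; infer_instance

-- ===== CLAIM (what is proved, stated in full; the proofs are below) =====
def Claim_equal_l_g : Prop := ∀ (spis : List (List Int)), Dom_l_g spis → Pre_l_g spis → Spec_l_g spis (l_g spis)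

-- ===== LEMMAS AND PROOFS =====

-- the row key x[1] and the in-place accumulation g[2] += v, as both ports compute them
def pvKey (r : List Int) : Int := PySem.List.pyGetD r 1 0
def pvBump (g : List Int) (v : Int) : List Int := g.set 2 (PySem.List.pyGetD g 2 0 + v)
-- repeated accumulation of a run into its first row
def pvComb (g : List Int) (run : List (List Int)) : List Int :=
  run.foldl (fun g q => pvBump g (PySem.List.pyGetD q 2 0)) g
-- the rows of l with key k, in order
def pvGrp (l : List (List Int)) (k : Int) : List (List Int) :=
  l.filter (fun r => pvKey r == k)
-- merged row for key k
def pvF (l : List (List Int)) (k : Int) : List Int :=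
  match pvGrp l k with
  | [] => []
  | r :: rest => pvComb r rest

-- structural form of A's index loop
def pvMergeGo (p : List Int) (acc : List (List Int)) : List (List Int) → List (List Int)
  | [] => acc
  | x :: r =>
    if pvKey x ≠ pvKey p then pvMergeGo x (acc ++ [x]) r
    else pvMergeGo x (acc.dropLast ++ [pvBump (acc.getLastD []) (PySem.List.pyGetD x 2 0)]) r

-- adjacent-merge of a run-of-equal-keys list, head-first
def pvGroups (g : List Int) : List (List Int) → List (List Int)
  | [] => [g]
  | x :: t =>
    if pvKey x = pvKey g then pvGroups (pvBump g (PySem.List.pyGetD x 2 0)) t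
    else g :: pvGroups x t

lemma pvKey_bump (g : List Int) (v : Int) : pvKey (pvBump g v) = pvKey g := by
  simp [pvKey, pvBump, PySem.List.pyGetD_ofNat']

lemma pvComb_cons (g x : List Int) (rest : List (List Int)) :
    pvComb g (x :: rest) = pvComb (pvBump g (PySem.List.pyGetD x 2 0)) rest := rfl

lemma pvGrp_cons_pos (r : List Int) (l : List (List Int)) (k : Int) (h : pvKey r = k) :
    pvGrp (r :: l) k = r :: pvGrp l k := by
  unfold pvGrp; rw [List.filter_cons_of_pos (by simpa using h)]

lemma pvGrp_cons_neg (r : List Int) (l : List (List Int)) (k : Int) (h : pvKey r ≠ k) :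
    pvGrp (r :: l) k = pvGrp l k := by
  unfold pvGrp; rw [List.filter_cons_of_neg (by simpa using h)]

lemma pvF_cons_pos (r : List Int) (l : List (List Int)) (k : Int) (h : pvKey r = k) :
    pvF (r :: l) k = pvComb r (pvGrp l k) := by
  unfold pvF; rw [pvGrp_cons_pos r l k h]

lemma pvF_cons_neg (r : List Int) (l : List (List Int)) (k : Int) (h : pvKey r ≠ k) :
    pvF (r :: l) k = pvF l k := by
  unfold pvF; rw [pvGrp_cons_neg r l k h]

lemma pv_dedup_cons_not_mem (a : Int) (l : List Int) (h : a ∉ l) :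
    PySem.List.dedup (a :: l) = a :: PySem.List.dedup l := by
  rw [PySem.List.dedup_eq_ofList, PySem.List.dedup_eq_ofList, PySem.Set.ofList_cons]
  congr 1
  rw [PySem.Set.discard]
  apply List.filter_eq_self.mpr
  intro b hb
  have hbl : b ∈ l := (PySem.Set.mem_ofList l b).mp hb
  have : b ≠ a := fun he => h (he ▸ hbl)
  simpa using this

lemma pv_dedup_cons_cons (a : Int) (l : List Int) :
    PySem.List.dedup (a :: a :: l) = PySem.List.dedup (a :: l) := by
  rw [PySem.List.dedup_eq_ofList, PySem.List.dedup_eq_ofList, PySem.Set.ofList_cons,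
    PySem.Set.ofList_cons]
  congr 1
  simp [PySem.Set.discard, List.filter_filter]

-- A's foldl over range(1, len s) with accesses s[i], s[i-1] is the fold over adjacent pairs
lemma pv_fold_pairs {β : Type} (s : List (List Int)) (F : β → List Int → List Int → β) (init : β) :
    (PySem.List.pyRange 1 (PySem.List.len s)).foldl
      (fun acc i => F acc (PySem.List.pyGetD s (i-1) []) (PySem.List.pyGetD s i [])) init
    = (s.zip s.tail).foldl (fun acc p => F acc p.1 p.2) init := by
  have hlen : (s.zip s.tail).length = s.length - 1 := by
    simp [List.length_zip, List.length_tail]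
  rw [← PySem.List.foldl_pyRange_zero_pyGetD (s.zip s.tail) (([],[]) : List Int × List Int)
      (fun acc p => F acc p.1 p.2) init]
  rw [PySem.List.pyRange_one, PySem.List.pyRange_one]
  have hn : ((PySem.List.len (s.zip s.tail)) - 0).toNat = s.length - 1 := by
    simp [PySem.List.len_eq, hlen]
  have hm : ((PySem.List.len s) - 1).toNat = s.length - 1 := by
    simp [PySem.List.len_eq]
  rw [hn, hm, List.foldl_map, List.foldl_map]
  apply PySem.List.foldl_congr_mem
  intro acc k hk
  have hk' : k < s.length - 1 := List.mem_range.mp hk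
  have h1 : (1 + (k:Int)) - 1 = ((k:Nat):Int) := by omega
  have h2 : (1 + (k:Int)) = (((k+1:Nat)):Int) := by push_cast; ring
  have h3 : (0 + (k:Int)) = ((k:Nat):Int) := by omega
  rw [h1, h2, h3, PySem.List.pyGetD_natCast, PySem.List.pyGetD_natCast, PySem.List.pyGetD_natCast]
  have hks : k < s.length := by omega
  have hks1 : k + 1 < s.length := by omega
  have hkz : k < (s.zip s.tail).length := by omega
  rw [List.getD_eq_getElem _ _ hks, List.getD_eq_getElem _ _ hks1, List.getD_eq_getElem _ _ hkz]
  rw [List.getElem_zip]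
  simp [List.getElem_tail]

lemma pv_zip_mergeGo (F : List (List Int) → List Int → List Int → List (List Int))
    (hF : ∀ acc p x, F acc p x = if pvKey x ≠ pvKey p then acc ++ [x]
      else acc.dropLast ++ [pvBump (acc.getLastD []) (PySem.List.pyGetD x 2 0)]) :
    ∀ (t : List (List Int)) (p : List Int) (acc : List (List Int)),
      ((p :: t).zip t).foldl (fun acc q => F acc q.1 q.2) acc = pvMergeGo p acc t := by
  intro t
  induction t with
  | nil => intro p acc; rfl
  | cons x r ih =>
    intro p acc
    rw [List.zip_cons_cons, List.foldl_cons, ih, pvMergeGo, hF]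
    split <;> rfl

lemma pv_mergeGo_groups : ∀ (t : List (List Int)) (g p : List Int) (init : List (List Int)),
    pvKey g = pvKey p → pvMergeGo p (init ++ [g]) t = init ++ pvGroups g t := by
  intro t
  induction t with
  | nil => intro g p init _; rfl
  | cons x r ih =>
    intro g p init hk
    rw [pvMergeGo, pvGroups]
    by_cases hx : pvKey x = pvKey g
    · rw [if_neg (by simp [hx, hk]), if_pos hx]
      rw [List.dropLast_concat, List.getLastD_concat]
      exact ih (pvBump g (PySem.List.pyGetD x 2 0)) x init (by rw [pvKey_bump, hx])
    · rw [if_pos (by rw [hk] at hx; exact hx), if_neg hx]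
      rw [List.append_assoc init [g] [x], List.singleton_append,
        show g :: [x] = [g] ++ [x] from rfl, ← List.append_assoc]
      have := ih x x (init ++ [g]) rfl
      rw [this, List.append_assoc, List.singleton_append]

-- A = adjacent merge of the sorted list
lemma pv_lg_eq_groups (spis : List (List Int)) (h : List Int) (t : List (List Int))
    (hs : PySem.List.sorted spis (fun x => PySem.List.pyGetD x 1 0) = h :: t) :
    l_g spis = pvGroups h t := by
  unfold l_g
  rw [hs]
  show (PySem.List.pyRange 1 (PySem.List.len (h :: t))).foldl
      (fun isp i =>
        if PySem.List.pyGetD (PySem.List.pyGetD (h :: t) i []) 1 0 ≠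
           PySem.List.pyGetD (PySem.List.pyGetD (h :: t) (i-1) []) 1 0 then
          isp ++ [PySem.List.pyGetD (h :: t) i []]
        else
          isp.dropLast ++ [(isp.getLastD []).set 2
            (PySem.List.pyGetD (isp.getLastD []) 2 0 +
             PySem.List.pyGetD (PySem.List.pyGetD (h :: t) i []) 2 0)])
      [PySem.List.pyGetD (h :: t) 0 []] = pvGroups h t
  rw [pv_fold_pairs (h :: t) (fun acc p x =>
      if PySem.List.pyGetD x 1 0 ≠ PySem.List.pyGetD p 1 0 then acc ++ [x]
      else acc.dropLast ++ [(acc.getLastD []).set 2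
        (PySem.List.pyGetD (acc.getLastD []) 2 0 + PySem.List.pyGetD x 2 0)])]
  rw [List.tail_cons]
  rw [pv_zip_mergeGo (fun acc p x =>
      if PySem.List.pyGetD x 1 0 ≠ PySem.List.pyGetD p 1 0 then acc ++ [x]
      else acc.dropLast ++ [(acc.getLastD []).set 2
        (PySem.List.pyGetD (acc.getLastD []) 2 0 + PySem.List.pyGetD x 2 0)])
    (fun acc p x => by simp [pvKey, pvBump]) t h _]
  have h0 : PySem.List.pyGetD (h :: t) 0 [] = h := by
    rw [PySem.List.pyGetD_ofNat']; rfl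
  rw [h0, show [h] = [] ++ [h] from rfl, pv_mergeGo_groups t h h [] rfl,
    List.nil_append]

-- insertBy stays sorted
lemma pv_insertBy_pairwise (x : List Int) (ys : List (List Int))
    (hy : ys.Pairwise (fun a b => pvKey a ≤ pvKey b)) :
    (PySem.List.insertBy (fun a b => decide (pvKey a < pvKey b)) x ys).Pairwise
      (fun a b => pvKey a ≤ pvKey b) := by
  induction ys with
  | nil => simp [PySem.List.insertBy]
  | cons y ys ih =>
    rw [List.pairwise_cons] at hy
    obtain ⟨hyall, hys⟩ := hy
    simp only [PySem.List.insertBy]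
    split_ifs with hb
    · simp only [decide_eq_true_eq] at hb
      refine List.Pairwise.cons ?_ (List.Pairwise.cons hyall hys)
      intro z hz
      rcases List.mem_cons.mp hz with rfl | hz
      · exact le_of_lt hb
      · exact le_of_lt (lt_of_lt_of_le hb (hyall z hz))
    · simp only [decide_eq_true_eq, not_lt] at hb
      refine List.Pairwise.cons ?_ (ih hys)
      intro z hz
      rcases (PySem.List.mem_insertBy _ _ _ _).mp hz with rfl | hz
      · exact hb
      · exact hyall z hz


-- stability of insertion: the key-k rows of insertBy x ys are those of ys, then x
lemma pv_insertBy_filter (k : Int) (x : List Int) (ys : List (List Int))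
    (hy : ys.Pairwise (fun a b => pvKey a ≤ pvKey b)) :
    (PySem.List.insertBy (fun a b => decide (pvKey a < pvKey b)) x ys).filter
        (fun r => pvKey r == k)
      = ys.filter (fun r => pvKey r == k) ++ if pvKey x == k then [x] else [] := by
  induction ys with
  | nil => simp [PySem.List.insertBy, List.filter_cons]
  | cons y ys ih =>
    rw [List.pairwise_cons] at hy
    obtain ⟨hyall, hys⟩ := hy
    simp only [PySem.List.insertBy]
    by_cases hb : pvKey x < pvKey y
    · rw [if_pos (by simpa using hb)]
      by_cases hx : pvKey x == k
      · have hfy : (y :: ys).filter (fun r => pvKey r == k) = [] := by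
          rw [List.filter_eq_nil_iff]
          intro z hz
          have hle : pvKey y ≤ pvKey z := by
            rcases List.mem_cons.mp hz with rfl | hz
            · exact le_refl _
            · exact hyall z hz
          have hxk : pvKey x = k := by simpa using hx
          simp only [beq_iff_eq]
          omega
        simp [hx, hfy]
      · simp [List.filter_cons, hx]
    · rw [if_neg (by simpa using hb)]
      simp only [List.filter_cons, ih hys]
      split <;> simp

lemma pv_foldl_insertBy_filter (k : Int) :
    ∀ (xs acc : List (List Int)), acc.Pairwise (fun a b => pvKey a ≤ pvKey b) →
    (xs.foldl (fun acc x => PySem.List.insertBy (fun a b => decide (pvKey a < pvKey b)) x acc) acc).filter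
        (fun r => pvKey r == k)
      = acc.filter (fun r => pvKey r == k) ++ xs.filter (fun r => pvKey r == k) := by
  intro xs
  induction xs with
  | nil => intro acc _; simp
  | cons x xs ih =>
    intro acc hacc
    rw [List.foldl_cons, ih _ (pv_insertBy_pairwise x acc hacc),
      pv_insertBy_filter k x acc hacc, List.filter_cons, List.append_assoc]
    split <;> simp

-- stability of the sort: equal-key rows keep their original order
lemma pv_grp_sorted (spis : List (List Int)) (k : Int) :
    pvGrp (PySem.List.sorted spis (fun x => PySem.List.pyGetD x 1 0)) k = pvGrp spis k := by
  show pvGrp (PySem.List.sorted spis (fun x => pvKey x)) k = pvGrp spis k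
  rw [PySem.List.sorted_eq_foldl_insertBy]
  unfold pvGrp
  rw [pv_foldl_insertBy_filter k spis [] (List.Pairwise.nil)]
  simp

-- the merged dict, looked up
lemma pv_dict_get (l : List (List Int)) (d : PySem.Dict Int (List Int)) (k : Int) :
    (l.foldl (fun d row =>
      let kk := PySem.List.pyGetD row 1 0
      if d.contains kk then
        let g := d.getD kk []
        d.insert kk (g.set 2 (PySem.List.pyGetD g 2 0 + PySem.List.pyGetD row 2 0))
      else d.insert kk row) d).get? k
    = match d.get? k with
      | some g => some (pvComb g (pvGrp l k))
      | none => match pvGrp l k with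
                | [] => none
                | r :: rest => some (pvComb r rest) := by
  induction l generalizing d with
  | nil => cases hd : d.get? k <;> simp [pvGrp, pvComb, hd]
  | cons x l ih =>
    rw [List.foldl_cons, ih]
    by_cases hxk : pvKey x = k
    · have hgrp : pvGrp (x :: l) k = x :: pvGrp l k := by
        unfold pvGrp; rw [List.filter_cons_of_pos (by simpa using hxk)]
      cases hd : d.get? k with
      | some g =>
        have hc : d.contains (PySem.List.pyGetD x 1 0) = true := by
          show d.contains (pvKey x) = true
          rw [hxk, PySem.Dict.contains_eq_isSome_get?, hd]; rfl
        have hgd : d.getD (PySem.List.pyGetD x 1 0) [] = g := by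
          show d.getD (pvKey x) [] = g
          rw [hxk, PySem.Dict.getD_eq_get?_getD, hd]; rfl
        simp only [hc, if_true, hgd]
        have hins : ((d.insert (PySem.List.pyGetD x 1 0)
            (g.set 2 (PySem.List.pyGetD g 2 0 + PySem.List.pyGetD x 2 0))).get? k)
            = some (pvBump g (PySem.List.pyGetD x 2 0)) := by
          show ((d.insert (pvKey x) _).get? k) = _
          rw [hxk, PySem.Dict.get?_insert_self]; rfl
        rw [hins, hgrp, pvComb_cons]
      | none =>
        have hc : d.contains (PySem.List.pyGetD x 1 0) = false := by
          show d.contains (pvKey x) = false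
          rw [hxk, PySem.Dict.contains_eq_isSome_get?, hd]; rfl
        simp only [hc, Bool.false_eq_true, if_false]
        have hins : ((d.insert (PySem.List.pyGetD x 1 0) x).get? k) = some x := by
          show ((d.insert (pvKey x) x).get? k) = _
          rw [hxk, PySem.Dict.get?_insert_self]
        rw [hins, hgrp]
    · have hgrp : pvGrp (x :: l) k = pvGrp l k := by
        unfold pvGrp; rw [List.filter_cons_of_neg (by simpa using hxk)]
      have hne : k ≠ PySem.List.pyGetD x 1 0 := fun h => hxk h.symm
      by_cases hc : d.contains (PySem.List.pyGetD x 1 0) = true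
      · simp only [hc, if_true]
        rw [PySem.Dict.get?_insert_of_ne _ _ hne, hgrp]
      · simp only [Bool.not_eq_true] at hc
        simp only [hc, Bool.false_eq_true, if_false]
        rw [PySem.Dict.get?_insert_of_ne _ _ hne, hgrp]


-- B's dict values: one merged row per distinct key, in first-occurrence order
lemma pv_dict_values (spis : List (List Int)) :
    (spis.foldl (fun d row =>
      let kk := PySem.List.pyGetD row 1 0
      if d.contains kk then
        let g := d.getD kk []
        d.insert kk (g.set 2 (PySem.List.pyGetD g 2 0 + PySem.List.pyGetD row 2 0))
      else d.insert kk row) (PySem.Dict.empty : PySem.Dict Int (List Int))).values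
    = (PySem.List.dedup (spis.map pvKey)).map (pvF spis) := by
  set step := (fun (d : PySem.Dict Int (List Int)) (row : List Int) =>
      let kk := PySem.List.pyGetD row 1 0
      if d.contains kk then
        let g := d.getD kk []
        d.insert kk (g.set 2 (PySem.List.pyGetD g 2 0 + PySem.List.pyGetD row 2 0))
      else d.insert kk row) with hstepdef
  have hshape : step = fun d x => d.insert (pvKey x)
      (if d.contains (pvKey x) then
        (d.getD (pvKey x) []).set 2 (PySem.List.pyGetD (d.getD (pvKey x) []) 2 0 +
          PySem.List.pyGetD x 2 0)
       else x) := by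
    funext d x
    rw [hstepdef]
    by_cases hc : d.contains (PySem.List.pyGetD x 1 0) = true
    · simp only [hc, if_true, pvKey]
    · simp only [Bool.not_eq_true] at hc
      simp only [hc, Bool.false_eq_true, if_false, pvKey]
  set d := spis.foldl step (PySem.Dict.empty : PySem.Dict Int (List Int)) with hd
  have hkeys : d.keys = PySem.List.dedup (spis.map pvKey) := by
    rw [hd, hshape, PySem.Dict.keys_foldl_insert_key]
    rfl
  have hnd : d.keys.Nodup := by
    rw [hd, hshape]
    exact PySem.Dict.nodup_keys_foldl_insert_key _ _ _ _ (by simp [PySem.Dict.empty])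
  rw [PySem.Dict.values_eq_map_keys d hnd [], hkeys]
  apply List.map_congr_left
  intro k hk
  have hmem : k ∈ spis.map pvKey := by
    have := (PySem.List.mem_dedup (x := k) (xs := spis.map pvKey)).mp hk
    exact this
  have hgrp : pvGrp spis k ≠ [] := by
    obtain ⟨r, hr, hrk⟩ := List.mem_map.mp hmem
    intro hnil
    have : r ∈ pvGrp spis k := by
      unfold pvGrp
      exact List.mem_filter.mpr ⟨hr, by simpa using hrk⟩
    rw [hnil] at this
    exact absurd this (List.not_mem_nil)
  rw [PySem.Dict.getD_eq_get?_getD, hd, hstepdef, pv_dict_get]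
  have hemp : (PySem.Dict.empty : PySem.Dict Int (List Int)).get? k = none := rfl
  rw [hemp]
  unfold pvF
  cases hg : pvGrp spis k with
  | nil => exact absurd hg hgrp
  | cons r rest => rfl


-- adjacent merge of a sorted list = one merged row per distinct key, in key order
lemma pv_groups_eq : ∀ (t : List (List Int)) (g : List Int),
    (g :: t).Pairwise (fun a b => pvKey a ≤ pvKey b) →
    pvGroups g t = (PySem.List.dedup ((g :: t).map pvKey)).map (pvF (g :: t)) := by
  intro t
  induction t with
  | nil =>
    intro g _
    rw [pvGroups]
    simp only [List.map_cons, List.map_nil]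
    rw [show PySem.List.dedup [pvKey g] = [pvKey g] from rfl]
    simp only [List.map_cons, List.map_nil]
    unfold pvF pvGrp
    simp [pvComb]
  | cons x t ih =>
    intro g hp
    rw [List.pairwise_cons] at hp
    obtain ⟨hgall, hp'⟩ := hp
    by_cases hx : pvKey x = pvKey g
    · -- merge into g
      rw [pvGroups, if_pos hx]
      have hp2 : (pvBump g (PySem.List.pyGetD x 2 0) :: t).Pairwise (fun a b => pvKey a ≤ pvKey b) := by
        rw [List.pairwise_cons]
        refine ⟨?_, (List.pairwise_cons.mp hp').2⟩
        intro z hz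
        rw [pvKey_bump]
        exact hgall z (List.mem_cons_of_mem x hz)
      rw [ih _ hp2]
      have hkeys : (pvBump g (PySem.List.pyGetD x 2 0) :: t).map pvKey = pvKey g :: t.map pvKey := by
        simp [pvKey_bump]
      have hkeys2 : (g :: x :: t).map pvKey = pvKey g :: pvKey g :: t.map pvKey := by
        simp [hx]
      rw [hkeys, hkeys2, pv_dedup_cons_cons]
      apply List.map_congr_left
      intro k hk
      by_cases hkg : pvKey g = k
      · rw [pvF_cons_pos _ _ _ (by rw [pvKey_bump]; exact hkg),
          pvF_cons_pos _ _ _ hkg, pvGrp_cons_pos _ _ _ (hx.trans hkg), pvComb_cons]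
      · rw [pvF_cons_neg _ _ _ (by rw [pvKey_bump]; exact hkg),
          pvF_cons_neg _ _ _ hkg, pvF_cons_neg _ _ _ (fun h => hkg ((hx.symm).trans h))]
    · -- new group
      rw [pvGroups, if_neg hx]
      have hlt : ∀ z ∈ x :: t, pvKey g < pvKey z := by
        intro z hz
        have h1 : pvKey g ≤ pvKey x := hgall x List.mem_cons_self
        rcases List.mem_cons.mp hz with rfl | hz'
        · exact lt_of_le_of_ne h1 (fun h => hx h.symm)
        · have h2 : pvKey x ≤ pvKey z := (List.pairwise_cons.mp hp').1 z hz'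
          have := lt_of_le_of_ne h1 (fun h => hx h.symm)
          omega
      have hnm : pvKey g ∉ (x :: t).map pvKey := by
        intro hm
        obtain ⟨z, hz, hzk⟩ := List.mem_map.mp hm
        exact absurd hzk (ne_of_gt (hlt z hz))
      rw [ih x hp']
      simp only [List.map_cons]
      have hnm' : pvKey g ∉ pvKey x :: List.map pvKey t := by
        simpa using hnm
      rw [pv_dedup_cons_not_mem (pvKey g) (pvKey x :: List.map pvKey t) hnm', List.map_cons]
      congr 1
      · -- head: pvF (g :: x :: t) (pvKey g) = g
        rw [pvF_cons_pos _ _ _ rfl]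
        have hgx : pvGrp (x :: t) (pvKey g) = [] := by
          unfold pvGrp
          rw [List.filter_eq_nil_iff]
          intro z hz
          simpa using (ne_of_gt (hlt z hz))
        rw [hgx]
        rfl
      · apply List.map_congr_left
        intro k hk
        have hkm : k ∈ (x :: t).map pvKey := by
          have := (PySem.List.mem_dedup _ _).mp hk
          exact this
        have hkg : pvKey g ≠ k := fun h => hnm (h ▸ hkm)
        rw [pvF_cons_neg _ _ _ hkg]

lemma pv_groups_keys : ∀ (t : List (List Int)) (g : List Int),
    ∀ y ∈ pvGroups g t, ∃ z ∈ g :: t, pvKey y = pvKey z := by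
  intro t
  induction t with
  | nil =>
    intro g y hy
    rw [pvGroups] at hy
    rcases List.mem_singleton.mp hy with rfl
    exact ⟨y, List.mem_cons_self, rfl⟩
  | cons x t ih =>
    intro g y hy
    rw [pvGroups] at hy
    by_cases hx : pvKey x = pvKey g
    · rw [if_pos hx] at hy
      obtain ⟨z, hz, hzy⟩ := ih _ y hy
      rcases List.mem_cons.mp hz with rfl | hz'
      · exact ⟨g, List.mem_cons_self, by rwa [pvKey_bump] at hzy⟩
      · exact ⟨z, List.mem_cons_of_mem _ (List.mem_cons_of_mem _ hz'), hzy⟩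
    · rw [if_neg hx] at hy
      rcases List.mem_cons.mp hy with rfl | hy'
      · exact ⟨y, List.mem_cons_self, rfl⟩
      · obtain ⟨z, hz, hzy⟩ := ih x y hy'
        exact ⟨z, List.mem_cons_of_mem _ hz, hzy⟩


lemma pv_groups_pairwise : ∀ (t : List (List Int)) (g : List Int),
    (g :: t).Pairwise (fun a b => pvKey a ≤ pvKey b) →
    (pvGroups g t).Pairwise (fun a b => pvKey a < pvKey b) := by
  intro t
  induction t with
  | nil => intro g _; rw [pvGroups]; exact List.pairwise_singleton _ _
  | cons x t ih =>
    intro g hp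
    rw [List.pairwise_cons] at hp
    obtain ⟨hgall, hp'⟩ := hp
    rw [pvGroups]
    by_cases hx : pvKey x = pvKey g
    · rw [if_pos hx]
      apply ih
      rw [List.pairwise_cons]
      refine ⟨?_, (List.pairwise_cons.mp hp').2⟩
      intro z hz
      rw [pvKey_bump]
      exact hgall z (List.mem_cons_of_mem x hz)
    · rw [if_neg hx]
      have hlt : ∀ z ∈ x :: t, pvKey g < pvKey z := by
        intro z hz
        have h1 : pvKey g ≤ pvKey x := hgall x List.mem_cons_self
        rcases List.mem_cons.mp hz with rfl | hz'
        · exact lt_of_le_of_ne h1 (fun h => hx h.symm)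
        · have h2 : pvKey x ≤ pvKey z := (List.pairwise_cons.mp hp').1 z hz'
          have := lt_of_le_of_ne h1 (fun h => hx h.symm)
          omega
      refine List.Pairwise.cons ?_ (ih x hp')
      intro y hy
      obtain ⟨z, hz, hzy⟩ := pv_groups_keys t x y hy
      rw [hzy]
      exact hlt z hz

-- ===== VERDICT (by name: the statement is the Claim_ definition above) =====
theorem l_g_spec : Claim_equal_l_g := by
  unfold Claim_equal_l_g
  intro spis _ hpre
  unfold Spec_l_g
  obtain ⟨hne, -⟩ := hpre
  have hsn : PySem.List.sorted spis (fun x => PySem.List.pyGetD x 1 0) ≠ [] := by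
    rw [Ne, PySem.List.sorted_eq_nil_iff]; exact hne
  obtain ⟨h, t, hs⟩ := List.exists_cons_of_ne_nil hsn
  rw [pv_lg_eq_groups spis h t hs]
  unfold l_g_alt
  show pvGroups h t = PySem.List.sorted
    ((spis.foldl (fun d row =>
      let kk := PySem.List.pyGetD row 1 0
      if d.contains kk then
        let g := d.getD kk []
        d.insert kk (g.set 2 (PySem.List.pyGetD g 2 0 + PySem.List.pyGetD row 2 0))
      else d.insert kk row) (PySem.Dict.empty : PySem.Dict Int (List Int))).values)
    (fun x => PySem.List.pyGetD x 1 0)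
  rw [pv_dict_values]
  -- the sorted list is pairwise ≤ in the key
  have hpw : (h :: t).Pairwise (fun a b => pvKey a ≤ pvKey b) := by
    have := PySem.List.sorted_pairwise spis (fun x => pvKey x)
    rwa [show PySem.List.sorted spis (fun x => pvKey x)
      = PySem.List.sorted spis (fun x => PySem.List.pyGetD x 1 0) from rfl, hs] at this
  -- A's result, one merged row per distinct key of the sorted list
  have hA : pvGroups h t = (PySem.List.dedup ((h :: t).map pvKey)).map (pvF spis) := by
    rw [pv_groups_eq t h hpw]
    apply List.map_congr_left
    intro k _
    rw [← hs]
    show pvF (PySem.List.sorted spis (fun x => PySem.List.pyGetD x 1 0)) k = pvF spis k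
    unfold pvF
    rw [pv_grp_sorted]
  -- the two distinct-key lists are permutations of each other
  have hperm : (PySem.List.dedup ((h :: t).map pvKey)).Perm
      (PySem.List.dedup (spis.map pvKey)) := by
    apply (List.perm_ext_iff_of_nodup (PySem.List.nodup_dedup _) (PySem.List.nodup_dedup _)).mpr
    intro k
    rw [PySem.List.mem_dedup, PySem.List.mem_dedup]
    constructor
    · intro hk
      have : k ∈ (PySem.List.sorted spis (fun x => PySem.List.pyGetD x 1 0)).map pvKey := by
        rw [hs]; exact hk
      obtain ⟨r, hr, hrk⟩ := List.mem_map.mp this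
      exact List.mem_map.mpr ⟨r, (PySem.List.mem_sorted _ _ _ _).mp hr, hrk⟩
    · intro hk
      obtain ⟨r, hr, hrk⟩ := List.mem_map.mp hk
      rw [← hs]
      exact List.mem_map.mpr ⟨r, (PySem.List.mem_sorted _ _ _ _).mpr hr, hrk⟩
  symm
  apply PySem.List.sorted_eq_of_perm_of_pairwise_lt
  · rw [hA]
    exact hperm.map (pvF spis)
  · exact pv_groups_pairwise t h hpw
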